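-- pv_equiv track=rewrite | github.com/shevalda/Crossword-Puzzle-Solver | bruteforce/main-rec.py | checkingPlaceholder
-- ===== SOURCE A (Python) =====
-- def checkingPlaceholder(matrix, n):
--     " Mencari kotak yang kosong di papan Crossword "
--     temp_l = []
--
--     # horizontal
--     hor_l = []
--     for i in range(n):
--         for j in range(n):
--             if matrix[i][j] == '-':
--                 temp_l.append((i,j))
--             elif len(temp_l) == 1:
--                 temp_l = []
--             elif len(temp_l) > 1:
--                 hor_l.append(temp_l)
--                 temp_l = []
--         if len(temp_l) > 1:
--             hor_l.append(temp_l)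
--         temp_l =[]
--
--     # vertical
--     ver_l = []
--     for i in range(n):
--         for j in range(n):
--             if matrix[j][i] == '-':
--                 temp_l.append((j,i))
--             elif len(temp_l) == 1:
--                 temp_l = []
--             elif len(temp_l) > 1:
--                 ver_l.append(temp_l)
--                 temp_l = []
--         if len(temp_l) > 1:
--             ver_l.append(temp_l)
--         temp_l = []
--     return hor_l + ver_l
-- ===== SOURCE B (Python) =====
-- def checkingPlaceholder(matrix, n):
--     " Mencari kotak yang kosong di papan Crossword "
--     def runs(cells):
--         # maximal runs of '-' of length > 1, as lists of coords
--         out = []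
--         while cells:
--             if cells[0][1] == '-':
--                 k = 1
--                 while k < len(cells) and cells[k][1] == '-':
--                     k += 1
--                 if k > 1:
--                     out.append([c for c, _ in cells[:k]])
--                 cells = cells[k:]
--             else:
--                 cells = cells[1:]
--         return out
--
--     res = []
--     for i in range(n):
--         res += runs([((i, j), matrix[i][j]) for j in range(n)])
--     for i in range(n):
--         res += runs([((j, i), matrix[j][i]) for j in range(n)])
--     return res
-- ===== Notes on version B (the rewrite author's own statement) =====
-- stated objective: idiomatic
-- what changed: A's duplicated stateful len==1/len>1 flushing accumulator is replaced by one reusable run-finder that spans maximal '-' runs (inner while = takeWhile/dropWhile) over each row's and each column's (coord, cell) sequence.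
import Mathlib
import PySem

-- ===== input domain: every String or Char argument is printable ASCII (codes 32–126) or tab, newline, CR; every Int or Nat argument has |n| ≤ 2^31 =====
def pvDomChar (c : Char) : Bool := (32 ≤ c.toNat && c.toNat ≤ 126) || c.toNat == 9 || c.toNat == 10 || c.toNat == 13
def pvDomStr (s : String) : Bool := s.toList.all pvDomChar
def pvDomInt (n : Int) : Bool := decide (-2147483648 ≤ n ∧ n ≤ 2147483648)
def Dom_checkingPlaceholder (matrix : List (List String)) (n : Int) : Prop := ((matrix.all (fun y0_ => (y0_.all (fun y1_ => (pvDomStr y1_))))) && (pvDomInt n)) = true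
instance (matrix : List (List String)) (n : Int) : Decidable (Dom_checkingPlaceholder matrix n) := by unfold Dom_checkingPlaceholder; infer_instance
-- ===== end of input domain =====

-- B replaces A's duplicated stateful accumulator (flush on len==1 / len>1) by a reusable
-- run-finder applied to each row and each column's (coord, cell) sequence; objective: idiomatic.

-- matrix[i][j]; Pre_ guarantees the indices are in range, the defaults are never used there
def pvCell (matrix : List (List String)) (i j : Int) : String :=
  PySem.List.pyGetD (PySem.List.pyGetD matrix i []) j ""

-- ===== PORT A =====
-- one iteration of A's inner loop body (the if/elif/elif chain over (temp_l, acc))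
def pvStepA (coord : Int × Int) (cell : String)
    (st : List (Int × Int) × List (List (Int × Int))) :
    List (Int × Int) × List (List (Int × Int)) :=
  if cell == "-" then (st.1 ++ [coord], st.2)
  else if st.1.length == 1 then ([], st.2)
  else if 1 < st.1.length then ([], st.2 ++ [st.1])
  else st

def checkingPlaceholder (matrix : List (List String)) (n : Int) : List (List (Int × Int)) :=
  let hor := (PySem.List.pyRange 0 n 1).foldl (fun hor i =>
    let st := (PySem.List.pyRange 0 n 1).foldl
      (fun st j => pvStepA (i, j) (pvCell matrix i j) st) ([], hor)
    if 1 < st.1.length then st.2 ++ [st.1] else st.2) []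
  let ver := (PySem.List.pyRange 0 n 1).foldl (fun ver i =>
    let st := (PySem.List.pyRange 0 n 1).foldl
      (fun st j => pvStepA (j, i) (pvCell matrix j i) st) ([], ver)
    if 1 < st.1.length then st.2 ++ [st.1] else st.2) []
  hor ++ ver

-- ===== PORT B =====
-- Source B's `runs`: while-loop over the remaining cells, inner while = takeWhile/dropWhile span
def pvRuns : List ((Int × Int) × String) → List (List (Int × Int))
  | [] => []
  | c :: rest =>
    if c.2 == "-" then
      (if 1 < (c :: rest.takeWhile (fun p => p.2 == "-")).length then
        [(c :: rest.takeWhile (fun p => p.2 == "-")).map Prod.fst] else []) ++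
      pvRuns (rest.dropWhile (fun p => p.2 == "-"))
    else pvRuns rest
termination_by cs => cs.length
decreasing_by
· simpa using Nat.lt_succ_of_le (List.length_dropWhile_le _ _)
· simp

def checkingPlaceholder_alt (matrix : List (List String)) (n : Int) : List (List (Int × Int)) :=
  let res := (PySem.List.pyRange 0 n 1).foldl (fun res i =>
    res ++ pvRuns ((PySem.List.pyRange 0 n 1).map (fun j => ((i, j), pvCell matrix i j)))) []
  (PySem.List.pyRange 0 n 1).foldl (fun res i =>
    res ++ pvRuns ((PySem.List.pyRange 0 n 1).map (fun j => ((j, i), pvCell matrix j i)))) res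

-- ===== PRECONDITION & SPEC =====
-- Pre_: the Python raises IndexError when n exceeds the number of rows or the length of an
-- accessed row; exactly those inputs are excluded.
def Pre_checkingPlaceholder (matrix : List (List String)) (n : Int) : Prop :=
  n ≤ (matrix.length : Int) ∧ ∀ row ∈ matrix.take n.toNat, n ≤ (row.length : Int)
instance (matrix : List (List String)) (n : Int) : Decidable (Pre_checkingPlaceholder matrix n) := by
  unfold Pre_checkingPlaceholder; infer_instance

def pvWitness_checkingPlaceholder : List (List String) × Int := ([["-", "-"], ["x", "-"]], 2)

def Spec_checkingPlaceholder (matrix : List (List String)) (n : Int) (out : List (List (Int × Int))) : Prop := out = checkingPlaceholder_alt matrix n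
instance (matrix : List (List String)) (n : Int) (out : List (List (Int × Int))) : Decidable (Spec_checkingPlaceholder matrix n out) := by unfold Spec_checkingPlaceholder; infer_instance

-- ===== CLAIM (what is proved, stated in full; the proofs are below) =====
def Claim_equal_checkingPlaceholder : Prop := ∀ (matrix : List (List String)) (n : Int), Dom_checkingPlaceholder matrix n → Pre_checkingPlaceholder matrix n → Spec_checkingPlaceholder matrix n (checkingPlaceholder matrix n)

-- ===== LEMMAS AND PROOFS =====

-- A's pending run (`temp_l`) made explicit: runs of '-' of length > 1, one cell at a time
def pvRunsP (temp : List (Int × Int)) : List ((Int × Int) × String) → List (List (Int × Int))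
  | [] => if 1 < temp.length then [temp] else []
  | c :: rest =>
    if c.2 == "-" then pvRunsP (temp ++ [c.1]) rest
    else (if 1 < temp.length then [temp] else []) ++ pvRunsP [] rest

-- A's fold over one line, closed after the loop, equals the accumulator plus pvRunsP
theorem pvFoldA_eq (cells : List ((Int × Int) × String))
    (temp : List (Int × Int)) (acc : List (List (Int × Int))) :
    (let st := cells.foldl (fun st c => pvStepA c.1 c.2 st) (temp, acc)
     if 1 < st.1.length then st.2 ++ [st.1] else st.2) = acc ++ pvRunsP temp cells := by
  induction cells generalizing temp acc with
  | nil => simp only [List.foldl_nil, pvRunsP]; split <;> simp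
  | cons c rest ih =>
    rw [List.foldl_cons]
    by_cases hdash : c.2 == "-"
    · have hs : pvStepA c.1 c.2 (temp, acc) = (temp ++ [c.1], acc) := by
        simp [pvStepA, hdash]
      rw [hs, ih]
      simp [pvRunsP, hdash]
    · by_cases h1 : temp.length = 1
      · have hs : pvStepA c.1 c.2 (temp, acc) = ([], acc) := by
          simp [pvStepA, hdash, h1]
        rw [hs, ih]
        have hno : ¬ 1 < temp.length := by omega
        simp [pvRunsP, hdash, hno]
      · by_cases h2 : 1 < temp.length
        · have hs : pvStepA c.1 c.2 (temp, acc) = ([], acc ++ [temp]) := by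
            simp [pvStepA, hdash, h1, h2]
          rw [hs, ih]
          simp [pvRunsP, hdash, h2]
        · have h0 : temp = [] := by
            cases temp with
            | nil => rfl
            | cons a t => exfalso; simp only [List.length_cons] at h1 h2; omega
          subst h0
          have hs : pvStepA c.1 c.2 ([], acc) = ([], acc) := by
            simp [pvStepA, hdash]
          rw [hs, ih]
          simp [pvRunsP, hdash]

-- pvRunsP with a pending run consumes the whole leading '-'-span at once
theorem pvRunsP_accum (cells : List ((Int × Int) × String)) (temp : List (Int × Int)) :
    pvRunsP temp cells =
      (if 1 < (temp ++ (cells.takeWhile (fun p => p.2 == "-")).map Prod.fst).length then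
        [temp ++ (cells.takeWhile (fun p => p.2 == "-")).map Prod.fst] else []) ++
      pvRunsP [] (cells.dropWhile (fun p => p.2 == "-")) := by
  induction cells generalizing temp with
  | nil => simp [pvRunsP]
  | cons c rest ih =>
    by_cases hdash : c.2 == "-"
    · simp only [pvRunsP, hdash, if_true, List.takeWhile_cons, List.dropWhile_cons]
      rw [ih (temp ++ [c.1])]
      simp
    · simp only [pvRunsP, hdash, if_false, Bool.false_eq_true, List.takeWhile_cons,
        List.dropWhile_cons]
      simp

theorem pvRunsP_eq_runs (cells : List ((Int × Int) × String)) :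
    pvRunsP [] cells = pvRuns cells := by
  induction cells using pvRuns.induct with
  | case1 => simp [pvRunsP, pvRuns]
  | case2 c rest hdash ih =>
    rw [pvRuns]
    simp only [hdash, if_true]
    rw [pvRunsP]
    simp only [hdash, if_true]
    rw [pvRunsP_accum]
    simp [ih]
  | case3 c rest hdash ih =>
    rw [pvRuns]
    simp only [hdash]
    rw [pvRunsP]
    simp [hdash, ih]

-- one line of A (fold + post-loop flush) equals acc ++ pvRuns of its (coord, cell) sequence
theorem pvLine_eq (js : List Int) (g : Int → (Int × Int) × String)
    (acc : List (List (Int × Int))) :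
    (let st := js.foldl (fun st j => pvStepA (g j).1 (g j).2 st) ([], acc)
     if 1 < st.1.length then st.2 ++ [st.1] else st.2) = acc ++ pvRuns (js.map g) := by
  have : js.foldl (fun st j => pvStepA (g j).1 (g j).2 st) ([], acc)
      = (js.map g).foldl (fun st c => pvStepA c.1 c.2 st) ([], acc) := by
    rw [List.foldl_map]
  simp only [this]
  rw [pvFoldA_eq, pvRunsP_eq_runs]

theorem pvFoldAppend {α : Type} (f : Int → List α) (r : List Int) (init : List α) :
    r.foldl (fun acc i => acc ++ f i) init = init ++ r.foldl (fun acc i => acc ++ f i) [] := by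
  induction r generalizing init with
  | nil => simp
  | cons a t ih =>
    simp only [List.foldl_cons, List.nil_append]
    rw [ih, ih (f a)]
    simp

-- ===== VERDICT (by name: the statement is the Claim_ definition above) =====
theorem checkingPlaceholder_spec : Claim_equal_checkingPlaceholder := by
  intro matrix n _ _
  unfold Spec_checkingPlaceholder checkingPlaceholder checkingPlaceholder_alt
  have hrow : ∀ (g : Int → Int → (Int × Int) × String),
      (fun (acc : List (List (Int × Int))) (i : Int) =>
        let st := (PySem.List.pyRange 0 n 1).foldl
          (fun st j => pvStepA (g i j).1 (g i j).2 st) ([], acc)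
        if 1 < st.1.length then st.2 ++ [st.1] else st.2)
      = (fun acc i => acc ++ pvRuns ((PySem.List.pyRange 0 n 1).map (g i))) := by
    intro g; funext acc i; exact pvLine_eq (PySem.List.pyRange 0 n 1) (g i) acc
  have h1 := hrow (fun i j => ((i, j), pvCell matrix i j))
  have h2 := hrow (fun i j => ((j, i), pvCell matrix j i))
  simp only [h1, h2]
  conv_rhs => rw [pvFoldAppend]
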